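-- pv_equiv track=rewrite | github.com/BUPT-ANTlab/OARLM2I2 | agent/qlearning.py | getBinNums
-- ===== SOURCE A (Python) =====
-- def getBinNums(MaxLen):
--     BinNums = []
--     for i_1 in range(3, MaxLen):
--         for i_2 in range(2, i_1):
--             for i_3 in range(1, i_2):
--                 for i_4 in range(0, i_3):
--                     BinNums.append(pow(2, i_1) + pow(2, i_2) + pow(2, i_3) + pow(2, i_4))
--     for i_1 in range(2, MaxLen):
--         for i_2 in range(1, i_1):
--             for i_3 in range(0, i_2):
--                 BinNums.append(pow(2, i_1) + pow(2, i_2) + pow(2, i_3))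
--     for i_1 in range(1, MaxLen):
--         for i_2 in range(0, i_1):
--             BinNums.append(pow(2, i_1) + pow(2, i_2))
--     for i_1 in range(0, MaxLen):
--         BinNums.append(pow(2, i_1))
--     BinNums.append(0)
--     return BinNums
-- ===== SOURCE B (Python) =====
-- def getBinNums(MaxLen):
--     # One parametric recursion replaces A's five unrolled nested-loop blocks:
--     # combos(k, n) lists the sums of 2**i over every strictly-descending choice
--     # of k bit positions below n, largest position varying slowest (A's order).
--     def combos(k, n):
--         if k == 0:
--             return [0]
--         return [(1 << i) + s for i in range(k - 1, n) for s in combos(k - 1, i)]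
--     out = []
--     for k in (4, 3, 2, 1, 0):
--         out.extend(combos(k, MaxLen))
--     return out
-- ===== Notes on version B (the rewrite author's own statement) =====
-- stated objective: simpler
-- what changed: A's five separately unrolled nested-loop blocks (4,3,2,1 set bits plus the trailing 0) are replaced by one recursive generator combos(k, n) parametric in the number of set bits, called for k = 4..0.
import Mathlib
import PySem

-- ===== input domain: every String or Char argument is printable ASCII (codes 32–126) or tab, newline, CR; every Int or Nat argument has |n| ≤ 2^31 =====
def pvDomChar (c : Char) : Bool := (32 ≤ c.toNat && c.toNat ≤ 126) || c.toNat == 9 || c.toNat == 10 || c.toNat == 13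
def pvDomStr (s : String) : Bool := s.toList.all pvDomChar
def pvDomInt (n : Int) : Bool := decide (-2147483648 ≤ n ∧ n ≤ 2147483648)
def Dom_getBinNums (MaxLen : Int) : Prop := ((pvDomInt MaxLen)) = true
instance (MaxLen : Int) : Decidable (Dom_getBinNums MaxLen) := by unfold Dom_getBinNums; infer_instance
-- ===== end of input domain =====

-- B replaces A's five unrolled nested-loop blocks by one parametric recursion over the
-- number k of set bits (objective: simpler — same cost, one generator instead of five blocks).

-- ===== PORT A =====
-- All loop indices are ≥ 0 (ranges start at 0..3), so pow(2, i) is ported exactly as 2 ^ i.toNat.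
def getBinNums (MaxLen : Int) : List Int :=
  let b4 := (PySem.List.pyRange 3 MaxLen 1).foldl (fun acc i1 =>
    (PySem.List.pyRange 2 i1 1).foldl (fun acc i2 =>
      (PySem.List.pyRange 1 i2 1).foldl (fun acc i3 =>
        (PySem.List.pyRange 0 i3 1).foldl (fun acc i4 =>
          acc ++ [(2:Int) ^ i1.toNat + 2 ^ i2.toNat + 2 ^ i3.toNat + 2 ^ i4.toNat]) acc) acc) acc) []
  let b3 := (PySem.List.pyRange 2 MaxLen 1).foldl (fun acc i1 =>
    (PySem.List.pyRange 1 i1 1).foldl (fun acc i2 =>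
      (PySem.List.pyRange 0 i2 1).foldl (fun acc i3 =>
        acc ++ [(2:Int) ^ i1.toNat + 2 ^ i2.toNat + 2 ^ i3.toNat]) acc) acc) b4
  let b2 := (PySem.List.pyRange 1 MaxLen 1).foldl (fun acc i1 =>
    (PySem.List.pyRange 0 i1 1).foldl (fun acc i2 =>
      acc ++ [(2:Int) ^ i1.toNat + 2 ^ i2.toNat]) acc) b3
  let b1 := (PySem.List.pyRange 0 MaxLen 1).foldl (fun acc i1 =>
    acc ++ [(2:Int) ^ i1.toNat]) b2
  b1 ++ [0]

-- ===== PORT B =====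
-- combos(k, n): sums 2^i over each strictly descending choice of k positions below n.
def combosAlt : Nat → Int → List Int
  | 0, _ => [0]
  | (k+1), n =>
    (PySem.List.pyRange (k : Int) n 1).flatMap (fun i =>
      (combosAlt k i).map (fun s => (2:Int) ^ i.toNat + s))

def getBinNums_alt (MaxLen : Int) : List Int :=
  ([4, 3, 2, 1, 0] : List Nat).foldl (fun out k => out ++ combosAlt k MaxLen) []

-- ===== PRECONDITION & SPEC =====
def Spec_getBinNums (MaxLen : Int) (out : List Int) : Prop := out = getBinNums_alt MaxLen
instance (MaxLen : Int) (out : List Int) : Decidable (Spec_getBinNums MaxLen out) := by unfold Spec_getBinNums; infer_instance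

-- ===== CLAIM (what is proved, stated in full; the proofs are below) =====
def Claim_equal_getBinNums : Prop := ∀ (MaxLen : Int), Dom_getBinNums MaxLen → Spec_getBinNums MaxLen (getBinNums MaxLen)

-- ===== LEMMAS AND PROOFS =====
theorem flatMap_sing {a b : Type} (l : List a) (f : a → b) :
    l.flatMap (fun x => [f x]) = l.map f := by
  induction l with
  | nil => rfl
  | cons x xs ih => simp [List.flatMap_cons, ih]

theorem getBinNums_eq_alt (M : Int) : getBinNums M = getBinNums_alt M := by
  simp only [getBinNums, getBinNums_alt, combosAlt,
    PySem.List.foldl_append_singleton_eq_map, PySem.List.foldl_append_eq_flatMap,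
    List.map_flatMap, List.map_map, flatMap_sing, List.map_cons, List.map_nil, List.foldl_cons,
    List.foldl_nil, Function.comp_def, List.nil_append, List.append_assoc,
    Nat.cast_ofNat, Nat.cast_one, Nat.cast_zero, add_zero, add_assoc]

-- ===== VERDICT (by name: the statement is the Claim_ definition above) =====
theorem getBinNums_spec : Claim_equal_getBinNums := by
  intro MaxLen _
  unfold Spec_getBinNums
  exact getBinNums_eq_alt MaxLen
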